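-- pv_equiv track=rewrite | github.com/OscarBarreraGithub/PaperReplacer | scripts/query_techniques.py | _ranked_unique
-- ===== SOURCE A (Python) =====
-- from collections import Counter, defaultdict
--
-- def _ranked_unique(values: list[str]) -> tuple[str, ...]:
--     counts = Counter(values)
--     return tuple(
--         value
--         for value, _ in sorted(
--             counts.items(),
--             key=lambda item: (-item[1], -len(item[0]), item[0]),
--         )
--     )
-- ===== SOURCE B (Python) =====
-- from collections import Counter, defaultdict
--
-- def _ranked_unique(values: list[str]) -> tuple[str, ...]:
--     counts = Counter(values)
--     buckets = defaultdict(list)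
--     for value, cnt in counts.items():
--         buckets[cnt].append(value)
--     result = []
--     for freq in sorted(buckets, reverse=True):
--         result.extend(sorted(buckets[freq], key=lambda s: (-len(s), s)))
--     return tuple(result)
-- ===== Notes on version B (the rewrite author's own statement) =====
-- stated objective: alternative
-- what changed: Replaced the single composite-key sort of all counter items with a frequency-bucketed pass: build count->strings buckets, walk distinct frequencies in descending order, sort each bucket only by (-len, s) and concatenate.
import Mathlib
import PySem

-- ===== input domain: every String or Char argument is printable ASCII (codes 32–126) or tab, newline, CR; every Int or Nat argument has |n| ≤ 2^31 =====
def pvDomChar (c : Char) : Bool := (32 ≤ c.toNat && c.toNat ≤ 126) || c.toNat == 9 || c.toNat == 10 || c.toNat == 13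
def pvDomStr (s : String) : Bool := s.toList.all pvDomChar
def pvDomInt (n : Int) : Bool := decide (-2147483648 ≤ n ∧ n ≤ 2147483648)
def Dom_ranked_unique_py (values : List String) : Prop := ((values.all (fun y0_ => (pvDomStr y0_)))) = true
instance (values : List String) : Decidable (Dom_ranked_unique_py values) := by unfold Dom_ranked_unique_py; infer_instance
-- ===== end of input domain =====

-- B replaces A's single composite-key sort of all counter items by a frequency-bucketed pass
-- (group strings by count, walk the distinct counts in descending order, sort each bucket by
-- (-len, s) and concatenate); objective: alternative decomposition, same return value (proved below).

-- ===== PORT A =====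
def ranked_unique_py (values : List String) : List String :=
  let counts := PySem.Dict.counter values
  (PySem.List.sorted counts.items
      (fun item => toLex ((-item.2 : Int), toLex ((-(PySem.Str.len item.1) : Int), item.1)))).map
    (fun p => p.1)

-- ===== PORT B =====
def ranked_unique_py_alt (values : List String) : List String :=
  let counts := PySem.Dict.counter values
  let buckets : PySem.Dict Int (List String) :=
    counts.items.foldl (fun b p => b.modify p.2 [] (fun l => l ++ [p.1])) PySem.Dict.empty
  (PySem.List.sorted buckets.keys (fun f => f) true).foldl
    (fun res f =>
      res ++ PySem.List.sorted2 (buckets.getD f []) (fun s => (-(PySem.Str.len s) : Int)) (fun s => s))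
    []

-- ===== PRECONDITION & SPEC =====
def Spec_ranked_unique_py (values : List String) (out : List String) : Prop := out = ranked_unique_py_alt values
instance (values : List String) (out : List String) : Decidable (Spec_ranked_unique_py values out) := by unfold Spec_ranked_unique_py; infer_instance

-- ===== CLAIM (what is proved, stated in full; the proofs are below) =====
def Claim_equal_ranked_unique_py : Prop := ∀ (values : List String), Dom_ranked_unique_py values → Spec_ranked_unique_py values (ranked_unique_py values)

-- ===== LEMMAS AND PROOFS =====

-- the count of s in values, as the Int the Counter stores
def pvCnt (values : List String) (s : String) : Int := (values.count s : Int)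

-- A's composite sort key, expressed on the string alone
def pvKey (values : List String) (s : String) : Lex (Int × Lex (Int × String)) :=
  toLex (-(pvCnt values s), toLex ((-(PySem.Str.len s) : Int), s))

-- sorted2 (the port of B's within-bucket sorted with a pair key) IS sorted by the lexicographic pair
theorem sorted2_eq_sorted_lex (xs : List String) (k1 : String → Int) (k2 : String → String) :
    PySem.List.sorted2 xs k1 k2 false = PySem.List.sorted xs (fun x => toLex (k1 x, k2 x)) false := by
  unfold PySem.List.sorted2 PySem.List.sorted
  simp only [if_neg (by decide : ¬ (false = true))]
  congr 1
  funext acc x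
  congr 1
  funext a b
  have h : (toLex (k1 a, k2 a) < toLex (k1 b, k2 b)) ↔ (k1 a < k1 b ∨ k1 a = k1 b ∧ k2 a < k2 b) :=
    Prod.Lex.toLex_lt_toLex
  rw [Bool.eq_iff_iff]
  simp only [decide_eq_true_eq, Bool.or_eq_true, Bool.and_eq_true, Bool.not_eq_true',
    decide_eq_false_iff_not, h]
  constructor
  · rintro (h1 | ⟨h2, h3⟩)
    · exact Or.inl h1
    · rcases lt_trichotomy (k1 a) (k1 b) with hl | he | hg
      · exact Or.inl hl
      · exact Or.inr ⟨he, h3⟩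
      · exact absurd hg h2
  · rintro (h1 | ⟨h2, h3⟩)
    · exact Or.inl h1
    · exact Or.inr ⟨by omega, h3⟩

-- partition by a key: concatenating the key-buckets over a covering Nodup key list is a permutation
theorem flatMap_filter_perm {α κ : Type} [DecidableEq κ] (key : α → κ) :
    ∀ (fs : List κ) (U : List α), fs.Nodup → (∀ s ∈ U, key s ∈ fs) →
      (fs.flatMap (fun f => U.filter (fun s => key s == f))).Perm U := by
  intro fs
  induction fs with
  | nil =>
    intro U _ hcov
    have : U = [] := by
      cases U with
      | nil => rfl
      | cons a t => exact absurd (hcov a (List.mem_cons_self)) (List.not_mem_nil)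
    simp [this]
  | cons f fs ih =>
    intro U hnd hcov
    rw [List.flatMap_cons]
    have hne : f ∉ fs := (List.nodup_cons.mp hnd).1
    have hrw : fs.flatMap (fun g => U.filter (fun s => key s == g)) =
        fs.flatMap (fun g => (U.filter (fun s => !(key s == f))).filter (fun s => key s == g)) := by
      apply List.flatMap_congr
      intro g hg
      rw [List.filter_filter]
      apply List.filter_congr
      intro s _
      by_cases h : key s = g
      · have hgf : ¬ (g = f) := by rintro rfl; exact hne hg
        simp [h, hgf]
      · simp [h]
    rw [hrw]
    have ih' := ih (U.filter (fun s => !(key s == f))) (List.nodup_cons.mp hnd).2 (by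
      intro s hs
      rw [List.mem_filter] at hs
      have := hcov s hs.1
      rcases List.mem_cons.mp this with h | h
      · exfalso
        have : (!(key s == f)) = true := hs.2
        simp [h] at this
      · exact h)
    exact List.Perm.trans (ih'.append_left _) (List.filter_append_perm _ U)

-- B's buckets dict, rewritten as a fold over the (count, string) pairs of the distinct values
theorem buckets_eq (values : List String) :
    (PySem.Dict.counter values).items.foldl (fun b p => b.modify p.2 [] (fun l => l ++ [p.1]))
        (PySem.Dict.empty : PySem.Dict Int (List String)) =
      ((PySem.Set.ofList values).map (fun s => ((pvCnt values s : Int), s))).foldl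
        (fun b q => b.modify q.1 [] (fun l => l ++ [q.2])) PySem.Dict.empty := by
  rw [PySem.Dict.items_counter, List.foldl_map, List.foldl_map]
  rfl

theorem keys_buckets (values : List String) :
    (((PySem.Set.ofList values).map (fun s => ((pvCnt values s : Int), s))).foldl
        (fun b q => b.modify q.1 [] (fun l => l ++ [q.2]))
        (PySem.Dict.empty : PySem.Dict Int (List String))).keys =
      PySem.Set.ofList ((PySem.Set.ofList values).map (pvCnt values)) := by
  refine Eq.trans (PySem.Dict.keys_foldl_modify_key (β := Int × String) _ (fun q => q.1) [] (fun _ q => (fun l => l ++ [q.2])) _) ?_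
  rw [PySem.Dict.keys_empty, PySem.Set.update_nil_left, List.map_map]
  rfl

theorem getD_buckets (values : List String) (f : Int) :
    (((PySem.Set.ofList values).map (fun s => ((pvCnt values s : Int), s))).foldl
        (fun b q => b.modify q.1 [] (fun l => l ++ [q.2]))
        (PySem.Dict.empty : PySem.Dict Int (List String))).getD f [] =
      (PySem.Set.ofList values).filter (fun s => pvCnt values s == f) := by
  refine Eq.trans (PySem.Dict.getD_foldl_modify_append _ _ _) ?_
  simp only [PySem.Dict.getD_empty, List.nil_append, List.filter_map, List.map_map]
  have h1 : ((fun (x : Int × String) => x.2) ∘ fun s => (pvCnt values s, s)) = fun s => s := rfl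
  have h2 : ((fun (p : Int × String) => p.1 == f) ∘ fun s => (pvCnt values s, s)) = fun s => pvCnt values s == f := rfl
  rw [h1, h2, List.map_id']

-- B's port in closed form: descending distinct counts, each bucket sorted by the (-len, s) pair
theorem alt_eq_flatMap (values : List String) :
    ranked_unique_py_alt values =
      (PySem.List.sorted
          (PySem.Set.ofList ((PySem.Set.ofList values).map (pvCnt values))) (fun f => f) true).flatMap
        (fun f =>
          PySem.List.sorted ((PySem.Set.ofList values).filter (fun s => pvCnt values s == f))
            (fun s => toLex ((-(PySem.Str.len s) : Int), s)) false) := by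
  simp only [ranked_unique_py_alt]
  rw [buckets_eq, keys_buckets]
  rw [PySem.List.foldl_append_eq_flatMap, List.nil_append]
  apply List.flatMap_congr
  intro f _
  rw [getD_buckets, sorted2_eq_sorted_lex]

-- B's output is a permutation of the distinct values (first occurrences)
theorem alt_perm (values : List String) :
    (ranked_unique_py_alt values).Perm (PySem.Set.ofList values) := by
  rw [alt_eq_flatMap]
  have h1 : ((PySem.List.sorted
      (PySem.Set.ofList ((PySem.Set.ofList values).map (pvCnt values))) (fun f => f) true).flatMap
        (fun f =>
          PySem.List.sorted ((PySem.Set.ofList values).filter (fun s => pvCnt values s == f))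
            (fun s => toLex ((-(PySem.Str.len s) : Int), s)) false)).Perm
      ((PySem.List.sorted
      (PySem.Set.ofList ((PySem.Set.ofList values).map (pvCnt values))) (fun f => f) true).flatMap
        (fun f => (PySem.Set.ofList values).filter (fun s => pvCnt values s == f))) :=
    List.Perm.flatMap (List.Perm.refl _) (fun f _ => PySem.List.sorted_perm _ _ _)
  refine h1.trans ?_
  apply flatMap_filter_perm (pvCnt values)
  · exact ((PySem.List.sorted_perm _ _ _).nodup_iff).mpr
      (PySem.Set.nodup_ofList _)
  · intro s hs
    rw [PySem.List.mem_sorted, PySem.Set.mem_ofList]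
    exact List.mem_map_of_mem hs

-- B's output is strictly increasing in A's composite key
theorem alt_pairwise (values : List String) :
    (ranked_unique_py_alt values).Pairwise (fun a b => pvKey values a < pvKey values b) := by
  rw [alt_eq_flatMap]
  rw [List.pairwise_flatMap]
  constructor
  · -- within a bucket
    intro f _
    have hle := PySem.List.sorted_pairwise
      ((PySem.Set.ofList values).filter (fun s => pvCnt values s == f))
      (fun s => toLex ((-(PySem.Str.len s) : Int), s))
    have hnd : (PySem.List.sorted ((PySem.Set.ofList values).filter (fun s => pvCnt values s == f))
        (fun s => toLex ((-(PySem.Str.len s) : Int), s)) false).Nodup :=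
      ((PySem.List.sorted_perm _ _ _).nodup_iff).mpr
        ((PySem.Set.nodup_ofList values).filter _)
    refine (hle.and hnd).imp_of_mem ?_
    intro a b ha hb hab
    have hca : pvCnt values a = f := by
      have := List.of_mem_filter ((PySem.List.mem_sorted _ _ _ _).mp ha)
      exact beq_iff_eq.mp this
    have hcb : pvCnt values b = f := by
      have := List.of_mem_filter ((PySem.List.mem_sorted _ _ _ _).mp hb)
      exact beq_iff_eq.mp this
    have hne : toLex ((-(PySem.Str.len a) : Int), a) ≠ toLex ((-(PySem.Str.len b) : Int), b) := by
      intro h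
      have : ((-(PySem.Str.len a) : Int), a) = ((-(PySem.Str.len b) : Int), b) := by
        exact congrArg ofLex h
      exact hab.2 (congrArg Prod.snd this)
    have hlt := lt_of_le_of_ne hab.1 hne
    unfold pvKey
    exact Prod.Lex.toLex_lt_toLex.mpr (Or.inr ⟨by rw [hca, hcb], hlt⟩)
  · -- across buckets: descending distinct frequencies
    have hdesc := PySem.List.sorted_pairwise_rev
      (PySem.Set.ofList ((PySem.Set.ofList values).map (pvCnt values))) (fun f => f)
    have hnd : (PySem.List.sorted
        (PySem.Set.ofList ((PySem.Set.ofList values).map (pvCnt values))) (fun f => f) true).Nodup :=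
      ((PySem.List.sorted_perm _ _ _).nodup_iff).mpr (PySem.Set.nodup_ofList _)
    refine (hdesc.and hnd).imp ?_
    intro f g hfg x hx y hy
    have hgf : g < f := lt_of_le_of_ne hfg.1 (fun h => hfg.2 (h ▸ rfl))
    have hcx : pvCnt values x = f := by
      have := List.of_mem_filter ((PySem.List.mem_sorted _ _ _ _).mp hx)
      exact beq_iff_eq.mp this
    have hcy : pvCnt values y = g := by
      have := List.of_mem_filter ((PySem.List.mem_sorted _ _ _ _).mp hy)
      exact beq_iff_eq.mp this
    unfold pvKey
    exact Prod.Lex.toLex_lt_toLex.mpr (Or.inl (by rw [hcx, hcy]; omega))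

-- ===== VERDICT (by name: the statement is the Claim_ definition above) =====
theorem ranked_unique_py_spec : Claim_equal_ranked_unique_py := by
  intro values _
  unfold Spec_ranked_unique_py
  simp only [ranked_unique_py]
  rw [PySem.Dict.items_counter]
  have hperm : ((ranked_unique_py_alt values).map (fun s => (s, (values.count s : Int)))).Perm
      ((PySem.Set.ofList values).map (fun k => (k, (values.count k : Int)))) :=
    (alt_perm values).map _
  have hpw : ((ranked_unique_py_alt values).map (fun s => (s, (values.count s : Int)))).Pairwise
      (fun a b =>
        (fun (item : String × Int) => toLex ((-item.2 : Int), toLex ((-(PySem.Str.len item.1) : Int), item.1))) a <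
        (fun (item : String × Int) => toLex ((-item.2 : Int), toLex ((-(PySem.Str.len item.1) : Int), item.1))) b) := by
    rw [List.pairwise_map]
    exact (alt_pairwise values).imp (fun h => h)
  rw [PySem.List.sorted_eq_of_perm_of_pairwise_lt _ _ _ hperm hpw]
  rw [List.map_map]
  exact List.map_id' _
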